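-- pv_equiv track=rewrite | github.com/pypi-data/pypi-mirror-310 | packages/xython/xython-3.2.1-py3-none-any.whl/xython/youtil.py | delete_value_in_list_1d_by_step_no
-- ===== SOURCE A (Python) =====
-- def delete_value_in_list_1d_by_step_no(input_list, step, start=0):
-- 	"""
-- 	1차원의 자료중에서 원하는 순서째의 자료를 ""으로 만드는것
--
-- 	[1,2,3,4,5,6,7,8,9] ==> [1,2,"",4,5,"",7,8,""]
--
-- 	:param input_list:
-- 	:param step:
-- 	:param start:
-- 	:return:
-- 	"""
-- 	if start != 0:
-- 		result = input_list[0:start]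
-- 	else:
-- 		result = []
-- 	for num in range(start, len(input_list)):
-- 		temp_value = input_list[num]
-- 		if divmod(num, step)[1] == 0:
-- 			temp_value = ""
-- 		result.append(temp_value)
-- 	return result
-- ===== SOURCE B (Python) =====
-- def delete_value_in_list_1d_by_step_no(input_list, step, start=0):
--     # Copy the list, compute the first multiple of |step| at or after start
--     # in closed form, and blank all hit positions with one strided slice
--     # assignment (no per-element loop).
--     result = list(input_list)
--     s = abs(step)
--     first = ((max(start, 0) + s - 1) // s) * s
--     result[first::s] = [""] * len(result[first::s])
--     return result
-- ===== Notes on version B (the rewrite author's own statement) =====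
-- stated objective: idiomatic
-- what changed: Replaces the element-by-element loop (prefix slice + append with divmod test) by copying the list, computing the first blanked index in closed form and blanking all of them with one strided slice assignment.
-- intended difference: For negative start (with -len <= start so A still returns), A prepends input_list[0:start] and then re-walks from the negative index with wraparound, returning a list longer than the input with duplicated elements; B returns the input with every |step|-th element blanked, which is the intended value. — e.g. on delete_value_in_list_1d_by_step_no(["a", "b"], 2, -1): A returns ["a", "b", "", "b"], B returns ["", "b"]
-- outside the precondition, e.g. on delete_value_in_list_1d_by_step_no([], 0, 0): A returns [], B raises ZeroDivisionError; on delete_value_in_list_1d_by_step_no(['a'], 0, 5): A returns ['a'], B raises ZeroDivisionError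
import Mathlib
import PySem

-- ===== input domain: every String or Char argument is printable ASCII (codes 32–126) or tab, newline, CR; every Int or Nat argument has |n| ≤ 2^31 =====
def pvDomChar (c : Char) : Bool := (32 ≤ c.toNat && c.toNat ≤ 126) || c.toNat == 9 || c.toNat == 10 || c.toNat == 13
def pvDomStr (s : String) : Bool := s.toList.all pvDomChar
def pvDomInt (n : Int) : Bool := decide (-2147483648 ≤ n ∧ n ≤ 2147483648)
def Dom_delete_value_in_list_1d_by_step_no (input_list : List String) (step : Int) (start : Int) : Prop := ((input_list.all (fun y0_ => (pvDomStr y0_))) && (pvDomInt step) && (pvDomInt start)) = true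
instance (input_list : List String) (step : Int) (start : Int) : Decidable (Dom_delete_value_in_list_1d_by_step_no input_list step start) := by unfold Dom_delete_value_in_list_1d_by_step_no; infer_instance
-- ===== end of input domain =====

-- B blanks every |step|-th element via a copy plus one strided bulk update (closed-form first index)
-- instead of A's prefix-slice + element-by-element append loop; return value only, A mutates nothing.

-- ===== PORT A =====
def delete_value_in_list_1d_by_step_no (input_list : List String) (step : Int) (start : Int) : List String :=
  let result := if start ≠ 0 then PySem.List.slice input_list (some 0) (some start) else []
  (PySem.List.pyRange start input_list.length 1).foldl
    (fun res num =>
      let temp_value := PySem.List.pyGetD input_list num ""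
      let temp_value := if PySem.Int.mod num step = 0 then "" else temp_value
      res ++ [temp_value]) result

-- ===== PORT B =====
-- result[first::s] = [""] * len(result[first::s]) is ported as a positional map: exact Python
-- strided-slice-assignment semantics for 0 ≤ first and 0 < s, which B's arithmetic guarantees
-- whenever it returns (s = 0 raises in Python; those inputs are outside Pre_).
def delete_value_in_list_1d_by_step_no_alt (input_list : List String) (step : Int) (start : Int) : List String :=
  let s : Int := |step|
  let first : Int := (PySem.Int.floordiv (max start 0 + s - 1) s) * s
  input_list.mapIdx (fun i x =>
    if first ≤ (i : Int) ∧ PySem.Int.mod ((i : Int) - first) s = 0 then "" else x)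

-- ===== PRECONDITION & SPEC =====
-- Pre_ excludes step = 0 (A's divmod raises ZeroDivisionError whenever its loop runs, i.e. start
-- < len; when start >= len the loop body is never reached and A returns the untouched prefix, but
-- B's closed-form division by |step| = 0 itself raises there) and start < -len(input_list)
-- (IndexError on A's negative loop index).
def Pre_delete_value_in_list_1d_by_step_no (input_list : List String) (step : Int) (start : Int) : Prop :=
  step ≠ 0 ∧ -(input_list.length : Int) ≤ start
instance (input_list : List String) (step : Int) (start : Int) : Decidable (Pre_delete_value_in_list_1d_by_step_no input_list step start) := by unfold Pre_delete_value_in_list_1d_by_step_no; infer_instance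
def pvWitness_delete_value_in_list_1d_by_step_no : List String × Int × Int := (["a", "b", "c"], 2, 1)

-- For negative start (with -len ≤ start so A still returns), A prepends input_list[0:start] and then
-- re-walks from the negative index with wraparound, returning a list longer than the input with
-- duplicated elements; B returns the input with every |step|-th element blanked, the intended value.
def D_delete_value_in_list_1d_by_step_no (input_list : List String) (step : Int) (start : Int) : Prop :=
  start < 0
instance (input_list : List String) (step : Int) (start : Int) : Decidable (D_delete_value_in_list_1d_by_step_no input_list step start) := by unfold D_delete_value_in_list_1d_by_step_no; infer_instance

def Spec_delete_value_in_list_1d_by_step_no (input_list : List String) (step : Int) (start : Int) (out : List String) : Prop := ¬ D_delete_value_in_list_1d_by_step_no input_list step start → out = delete_value_in_list_1d_by_step_no_alt input_list step start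
instance (input_list : List String) (step : Int) (start : Int) (out : List String) : Decidable (Spec_delete_value_in_list_1d_by_step_no input_list step start out) := by unfold Spec_delete_value_in_list_1d_by_step_no; infer_instance

def pvDiffWitness_delete_value_in_list_1d_by_step_no : List String × Int × Int := (["a", "b"], 2, -1)
def pvDiffWitnessOut_delete_value_in_list_1d_by_step_no : (List String) × (List String) := (["a", "b", "", "b"], ["", "b"])

-- ===== CLAIM (what is proved, stated in full; the proofs are below) =====
def Claim_unchanged_delete_value_in_list_1d_by_step_no : Prop := ∀ (input_list : List String) (step : Int) (start : Int), Dom_delete_value_in_list_1d_by_step_no input_list step start → Pre_delete_value_in_list_1d_by_step_no input_list step start → Spec_delete_value_in_list_1d_by_step_no input_list step start (delete_value_in_list_1d_by_step_no input_list step start)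
def Claim_changed_delete_value_in_list_1d_by_step_no : Prop := Dom_delete_value_in_list_1d_by_step_no (pvDiffWitness_delete_value_in_list_1d_by_step_no.1) (pvDiffWitness_delete_value_in_list_1d_by_step_no.2.1) (pvDiffWitness_delete_value_in_list_1d_by_step_no.2.2) ∧ Pre_delete_value_in_list_1d_by_step_no (pvDiffWitness_delete_value_in_list_1d_by_step_no.1) (pvDiffWitness_delete_value_in_list_1d_by_step_no.2.1) (pvDiffWitness_delete_value_in_list_1d_by_step_no.2.2) ∧ D_delete_value_in_list_1d_by_step_no (pvDiffWitness_delete_value_in_list_1d_by_step_no.1) (pvDiffWitness_delete_value_in_list_1d_by_step_no.2.1) (pvDiffWitness_delete_value_in_list_1d_by_step_no.2.2) ∧ delete_value_in_list_1d_by_step_no (pvDiffWitness_delete_value_in_list_1d_by_step_no.1) (pvDiffWitness_delete_value_in_list_1d_by_step_no.2.1) (pvDiffWitness_delete_value_in_list_1d_by_step_no.2.2) = pvDiffWitnessOut_delete_value_in_list_1d_by_step_no.1 ∧ delete_value_in_list_1d_by_step_no_alt (pvDiffWitness_delete_value_in_list_1d_by_step_no.1) (pvDiffWitness_delete_value_in_list_1d_by_step_no.2.1)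 (pvDiffWitness_delete_value_in_list_1d_by_step_no.2.2) = pvDiffWitnessOut_delete_value_in_list_1d_by_step_no.2 ∧ pvDiffWitnessOut_delete_value_in_list_1d_by_step_no.1 ≠ pvDiffWitnessOut_delete_value_in_list_1d_by_step_no.2
def Claim_exact_delete_value_in_list_1d_by_step_no : Prop := ∀ (input_list : List String) (step : Int) (start : Int), Dom_delete_value_in_list_1d_by_step_no input_list step start → Pre_delete_value_in_list_1d_by_step_no input_list step start → D_delete_value_in_list_1d_by_step_no input_list step start → delete_value_in_list_1d_by_step_no input_list step start ≠ delete_value_in_list_1d_by_step_no_alt input_list step start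

-- ===== LEMMAS AND PROOFS =====

theorem blank_iff (step start i : Int) (hstep : step ≠ 0) (h0 : 0 ≤ start) :
    (start ≤ i ∧ step ∣ i) ↔
    ((PySem.Int.floordiv (max start 0 + |step| - 1) |step|) * |step| ≤ i ∧
      |step| ∣ (i - (PySem.Int.floordiv (max start 0 + |step| - 1) |step|) * |step|)) := by
  have hs : 0 < |step| := abs_pos.mpr hstep
  rw [max_eq_left h0]
  set s := |step| with hsdef
  set q := PySem.Int.floordiv (start + s - 1) s with hq
  have hqs : q * s ≤ start + s - 1 ∧ start + s - 1 < (q + 1) * s :=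
    (PySem.Int.floordiv_eq_iff_of_pos hs).mp hq.symm
  have hdf : s ∣ q * s := dvd_mul_left s q
  constructor
  · rintro ⟨hle, hd⟩
    have hd' : s ∣ i := (abs_dvd step i).mpr hd
    refine ⟨?_, dvd_sub hd' hdf⟩
    obtain ⟨a, ha⟩ := hd'
    have h1 : s * (q - 1) < s * a := by nlinarith [hqs.1]
    have h2 : q - 1 < a := lt_of_mul_lt_mul_left h1 (le_of_lt hs)
    have h3 : q ≤ a := by omega
    calc q * s ≤ a * s := by nlinarith
    _ = i := by rw [ha]; ring
  · rintro ⟨hle, hd⟩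
    have hd' : s ∣ i := by
      have := dvd_add hd hdf
      simpa using this
    refine ⟨?_, (abs_dvd step i).mp hd'⟩
    have : start ≤ q * s := by nlinarith [hqs.2]
    omega


theorem main (l : List String) (step start : Int) (hstep : step ≠ 0) (h0 : 0 ≤ start) :
    delete_value_in_list_1d_by_step_no l step start = delete_value_in_list_1d_by_step_no_alt l step start := by
  have hs : 0 < |step| := abs_pos.mpr hstep
  simp only [delete_value_in_list_1d_by_step_no, delete_value_in_list_1d_by_step_no_alt]
  rw [PySem.List.foldl_append_singleton_eq_map
    (fun num => if PySem.Int.mod num step = 0 then "" else PySem.List.pyGetD l num "")]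
  have hinit : (if start ≠ 0 then PySem.List.slice l (some 0) (some start) else []) =
      l.take start.toNat := by
    split_ifs with h
    · rw [PySem.List.slice_zero_start, PySem.List.slice_to l h0]
    · simp at h; simp [h]
  rw [hinit, PySem.List.pyRange_one, List.map_map]
  apply List.ext_getElem
  · simp; omega
  · intro i h1 h2
    simp only [List.length_mapIdx] at h2
    rw [List.getElem_append, List.getElem_mapIdx]
    split
    · next hlt =>
      simp only [List.length_take] at hlt
      rw [List.getElem_take]
      have hcond : ¬ ((PySem.Int.floordiv (max start 0 + |step| - 1) |step|) * |step| ≤ (i : Int) ∧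
          PySem.Int.mod ((i : Int) - (PySem.Int.floordiv (max start 0 + |step| - 1) |step|) * |step|) |step| = 0) := by
        rw [PySem.Int.mod_eq_zero_iff_dvd, ← blank_iff step start (i : Int) hstep h0]
        rintro ⟨hle, -⟩
        omega
      simp only [hcond, if_false]
    · next hge =>
      simp only [List.length_take, not_lt] at hge
      rw [List.getElem_map, List.getElem_range]
      simp only [Function.comp_apply, List.length_take]
      have htle : start.toNat ≤ l.length := by
        simp only [List.length_append, List.length_take, List.length_map, List.length_range] at h1
        omega
      have hieq : start + ((i - min start.toNat l.length : Nat) : Int) = (i : Int) := by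
        omega
      rw [hieq]
      have hcond : (PySem.Int.mod (i : Int) step = 0) ↔
          ((PySem.Int.floordiv (max start 0 + |step| - 1) |step|) * |step| ≤ (i : Int) ∧
          PySem.Int.mod ((i : Int) - (PySem.Int.floordiv (max start 0 + |step| - 1) |step|) * |step|) |step| = 0) := by
        rw [PySem.Int.mod_eq_zero_iff_dvd, PySem.Int.mod_eq_zero_iff_dvd,
          ← blank_iff step start (i : Int) hstep h0]
        constructor
        · intro hd; exact ⟨by omega, hd⟩
        · rintro ⟨-, hd⟩; exact hd
      rw [PySem.List.pyGetD_natCast, List.getD_eq_getElem?_getD, List.getElem?_eq_getElem h2,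
        Option.getD_some]
      split_ifs with ha hb hb
      · rfl
      · exact absurd (hcond.mp ha) hb
      · exact absurd (hcond.mpr hb) ha
      · rfl

theorem tight (l : List String) (step start : Int) (_hstep : step ≠ 0)
    (_hge : -(l.length : Int) ≤ start) (hneg : start < 0) :
    delete_value_in_list_1d_by_step_no l step start ≠ delete_value_in_list_1d_by_step_no_alt l step start := by
  intro heq
  have hlen := congrArg List.length heq
  simp only [delete_value_in_list_1d_by_step_no, delete_value_in_list_1d_by_step_no_alt] at hlen
  rw [PySem.List.foldl_append_singleton_eq_map
    (fun num => if PySem.Int.mod num step = 0 then "" else PySem.List.pyGetD l num "")] at hlen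
  have hne : start ≠ 0 := by omega
  rw [if_pos hne] at hlen
  set k := (-start).toNat with hk
  have hkpos : 0 < k := by omega
  have hstart : start = -(k : Int) := by omega
  rw [hstart] at hlen
  simp only [List.length_append, PySem.List.length_slice, List.length_map,
    PySem.List.length_pyRange_one, List.length_mapIdx,
    PySem.List.clampIdx_neg_natCast _ _ hkpos] at hlen
  have hc0 : PySem.List.clampIdx l.length (0 : Int) = 0 := by
    simpa using PySem.List.clampIdx_natCast l.length 0
  rw [hc0] at hlen
  omega

-- ===== VERDICT (by name: the statement is the Claim_ definition above) =====
theorem delete_value_in_list_1d_by_step_no_spec : Claim_unchanged_delete_value_in_list_1d_by_step_no := by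
  intro l step start _hdom hpre hnd
  exact main l step start hpre.1 (by unfold D_delete_value_in_list_1d_by_step_no at hnd; omega)

theorem delete_value_in_list_1d_by_step_no_changed : Claim_changed_delete_value_in_list_1d_by_step_no := by
  unfold Claim_changed_delete_value_in_list_1d_by_step_no; decide

theorem delete_value_in_list_1d_by_step_no_tight : Claim_exact_delete_value_in_list_1d_by_step_no := by
  intro l step start _hdom hpre hd
  exact tight l step start hpre.1 hpre.2 hd
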